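-- pv_equiv track=rewrite | github.com/dmedelUOH/Ayudantia2 | ayudantia1.py | comunaMasTrabajada
-- ===== SOURCE A (Python) =====
-- def comunaMasTrabajada(semana):
--     horas_dic = dict()
--     for maquina in semana:
--         comuna = maquina[3]
--         horas = maquina[2]
--         if comuna in horas_dic:
--             #voy a sumar las horas
--             horas_dic[comuna] += horas
--         else:
--             horas_dic[comuna] = horas
--
--     lista = []
--     for comunas, horas in horas_dic.items():
--         tupla = (comunas,horas)
--         lista.append(tupla)
--
--     return lista
-- ===== SOURCE B (Python) =====
-- def comunaMasTrabajada(semana):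
--     comunas_unicas = []
--     for maquina in semana:
--         if maquina[3] not in comunas_unicas:
--             comunas_unicas.append(maquina[3])
--     resultado = []
--     for comuna in comunas_unicas:
--         total = 0
--         for maquina in semana:
--             if maquina[3] == comuna:
--                 total += maquina[2]
--         resultado.append((comuna, total))
--     return resultado
-- ===== Notes on version B (the rewrite author's own statement) =====
-- stated objective: alternative
-- what changed: Replaces the dict accumulation with a two-phase scan: first collect the distinct comunas in first-seen order, then re-scan the list to sum the hours of each comuna.
import Mathlib
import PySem

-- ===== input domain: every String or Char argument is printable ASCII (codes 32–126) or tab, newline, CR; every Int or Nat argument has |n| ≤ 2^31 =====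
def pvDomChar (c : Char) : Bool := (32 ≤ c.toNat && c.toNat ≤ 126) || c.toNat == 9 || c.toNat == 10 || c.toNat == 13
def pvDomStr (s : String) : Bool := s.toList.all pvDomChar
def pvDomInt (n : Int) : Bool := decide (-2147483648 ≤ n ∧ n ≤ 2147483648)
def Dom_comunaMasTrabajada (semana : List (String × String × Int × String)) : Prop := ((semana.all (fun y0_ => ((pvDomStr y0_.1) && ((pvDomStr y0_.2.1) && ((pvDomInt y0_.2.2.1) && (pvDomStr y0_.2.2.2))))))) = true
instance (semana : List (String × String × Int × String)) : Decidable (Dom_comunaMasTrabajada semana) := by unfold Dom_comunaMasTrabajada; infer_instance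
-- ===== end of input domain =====

-- B replaces A's running dict with a two-phase scan (distinct comunas in first-seen order,
-- then a re-scan summing each comuna's hours); objective: alternative decomposition, not faster.

-- ===== PORT A =====
def comunaMasTrabajada (semana : List (String × String × Int × String)) : List (String × Int) :=
  let horas_dic : PySem.Dict String Int :=
    semana.foldl (fun d maquina =>
      let comuna := maquina.2.2.2
      let horas := maquina.2.2.1
      if d.contains comuna then
        d.insert comuna (d.getD comuna 0 + horas)
      else
        d.insert comuna horas) PySem.Dict.empty
  horas_dic.items.foldl (fun lista p => lista ++ [(p.1, p.2)]) []

-- ===== PORT B =====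
def comunaMasTrabajada_alt (semana : List (String × String × Int × String)) : List (String × Int) :=
  let comunas_unicas : List String :=
    semana.foldl (fun acc maquina =>
      if maquina.2.2.2 ∈ acc then acc else acc ++ [maquina.2.2.2]) []
  comunas_unicas.foldl (fun resultado comuna =>
    let total : Int :=
      semana.foldl (fun t maquina =>
        if maquina.2.2.2 == comuna then t + maquina.2.2.1 else t) 0
    resultado ++ [(comuna, total)]) []

-- ===== PRECONDITION & SPEC =====
def Spec_comunaMasTrabajada (semana : List (String × String × Int × String)) (out : List (String × Int)) : Prop := out = comunaMasTrabajada_alt semana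
instance (semana : List (String × String × Int × String)) (out : List (String × Int)) : Decidable (Spec_comunaMasTrabajada semana out) := by unfold Spec_comunaMasTrabajada; infer_instance

-- ===== CLAIM (what is proved, stated in full; the proofs are below) =====
def Claim_equal_comunaMasTrabajada : Prop := ∀ (semana : List (String × String × Int × String)), Dom_comunaMasTrabajada semana → Spec_comunaMasTrabajada semana (comunaMasTrabajada semana)

-- ===== LEMMAS AND PROOFS =====

-- A's branching step is one unconditional insert of (old value or 0) + horas.
theorem pvStepA (d : PySem.Dict String Int) (m : String × String × Int × String) :
    (if d.contains m.2.2.2 then d.insert m.2.2.2 (d.getD m.2.2.2 0 + m.2.2.1)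
     else d.insert m.2.2.2 m.2.2.1)
      = d.insert m.2.2.2 (d.getD m.2.2.2 0 + m.2.2.1) := by
  split_ifs with h
  · rfl
  · rw [PySem.Dict.getD_of_not_contains, Int.zero_add]
    simpa using h

-- Lookup in A's accumulation dict: the old value plus the filtered sum.
theorem pvGetDFold (l : List (String × String × Int × String))
    (d : PySem.Dict String Int) (c : String) :
    (l.foldl (fun d m => d.insert m.2.2.2 (d.getD m.2.2.2 0 + m.2.2.1)) d).getD c 0
      = d.getD c 0 + ((l.filter (fun m => m.2.2.2 == c)).map (·.2.2.1)).sum := by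
  induction l generalizing d with
  | nil => simp
  | cons m rest ih =>
    simp only [List.foldl_cons, ih, List.filter_cons]
    rw [PySem.Dict.getD_insert]
    by_cases h : c = m.2.2.2
    · simp [h, Int.add_assoc]
    · have h2 : ¬ (m.2.2.2 = c) := fun hh => h hh.symm
      simp [h, h2]

-- B's inner summing loop is the same filtered sum.
theorem pvSumFold (l : List (String × String × Int × String)) (c : String) (t : Int) :
    l.foldl (fun t m => if m.2.2.2 == c then t + m.2.2.1 else t) t
      = t + ((l.filter (fun m => m.2.2.2 == c)).map (·.2.2.1)).sum := by
  induction l generalizing t with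
  | nil => simp
  | cons m rest ih =>
    simp only [List.foldl_cons, List.filter_cons]
    split_ifs with h
    · rw [ih]; simp; ring
    · rw [ih]

-- ===== VERDICT (by name: the statement is the Claim_ definition above) =====
theorem comunaMasTrabajada_spec : Claim_equal_comunaMasTrabajada := by
  intro semana _
  unfold Spec_comunaMasTrabajada comunaMasTrabajada comunaMasTrabajada_alt
  -- Normalise A's loop step
  have hstep : (semana.foldl (fun d maquina =>
      if PySem.Dict.contains d maquina.2.2.2 then
        PySem.Dict.insert d maquina.2.2.2 (PySem.Dict.getD d maquina.2.2.2 0 + maquina.2.2.1)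
      else PySem.Dict.insert d maquina.2.2.2 maquina.2.2.1) PySem.Dict.empty)
      = semana.foldl (fun d m => PySem.Dict.insert d m.2.2.2 (PySem.Dict.getD d m.2.2.2 0 + m.2.2.1)) PySem.Dict.empty := by
    apply PySem.List.foldl_congr_mem
    intro d m _; exact pvStepA d m
  simp only [hstep]
  set D := semana.foldl (fun d m => PySem.Dict.insert d m.2.2.2 (PySem.Dict.getD d m.2.2.2 0 + m.2.2.1)) PySem.Dict.empty with hD
  have hnodup : D.keys.Nodup := by
    rw [hD]
    exact PySem.Dict.nodup_keys_foldl_insert_key semana (fun m => m.2.2.2) _ _ (by simp)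
  have hkeys : D.keys = PySem.Set.ofList (semana.map (fun m => m.2.2.2)) := by
    rw [hD, PySem.Dict.keys_foldl_insert_key]
    simp [PySem.Set.update_nil_left]
  have hcomunas : (semana.foldl (fun acc m => if m.2.2.2 ∈ acc then acc else acc ++ [m.2.2.2]) [])
      = PySem.Set.ofList (semana.map (fun m => m.2.2.2)) := by
    rw [← PySem.Set.update_nil_left, PySem.Set.update_map_eq_foldl_add]
    symm
    apply PySem.List.foldl_congr_mem
    intro s m _
    exact PySem.Set.add_eq_ite s m.2.2.2
  rw [PySem.Dict.items_eq_map_keys D hnodup 0]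
  rw [PySem.List.foldl_append_singleton_eq_map, PySem.List.foldl_append_singleton_eq_map]
  simp only [List.nil_append, List.map_map, hcomunas, hkeys]
  apply List.map_congr_left
  intro c _
  simp only [Function.comp]
  rw [hD, pvGetDFold, pvSumFold]
  simp
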